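-- pv_equiv track=rewrite | github.com/training-ucit/python_grundlagen | teilnehmer/tn03/tag03/log_analyse.py | report_vorbereitung
-- ===== SOURCE A (Python) =====
-- def report_vorbereitung(daten):
--     report_dict = {}
--     for l in daten:
--        wort = l[15:22].strip()
--        if not wort in report_dict:
--            report_dict[wort] = []
--        report_dict[wort].append(l)
--
--     return(report_dict)
-- ===== SOURCE B (Python) =====
-- def report_vorbereitung(daten):
--     # alternative decomposition: dedup the keys once, then build each group by a filter pass
--     schluessel = [l[15:22].strip() for l in daten]
--     return {k: [l for l, kl in zip(daten, schluessel) if kl == k]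
--             for k in dict.fromkeys(schluessel)}
-- ===== Notes on version B (the rewrite author's own statement) =====
-- stated objective: alternative
-- what changed: A builds the dict in one pass appending each line to its key's bucket; B instead computes the key list once, deduplicates it in first-occurrence order, and builds each group by an independent filter pass over the zipped (line, key) list.
import Mathlib
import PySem

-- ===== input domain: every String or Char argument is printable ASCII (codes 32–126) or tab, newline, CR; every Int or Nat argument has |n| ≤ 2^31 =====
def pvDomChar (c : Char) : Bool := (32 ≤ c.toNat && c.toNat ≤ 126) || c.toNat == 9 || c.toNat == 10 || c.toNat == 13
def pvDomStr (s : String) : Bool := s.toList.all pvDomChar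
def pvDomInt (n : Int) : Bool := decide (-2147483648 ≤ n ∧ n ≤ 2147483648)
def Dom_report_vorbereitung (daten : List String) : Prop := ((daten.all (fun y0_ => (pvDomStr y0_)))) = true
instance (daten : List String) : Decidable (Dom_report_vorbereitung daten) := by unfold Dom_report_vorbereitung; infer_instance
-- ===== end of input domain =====

-- B groups by building the deduplicated key list once and one filter pass per key,
-- instead of A's single hash-and-append loop; alternative decomposition, same results.


-- ===== PORT A =====
-- wort = l[15:22].strip()
def pvKey (l : String) : String := PySem.Str.strip (PySem.Str.slice l (some 15) (some 22))

def report_vorbereitung (daten : List String) : List (String × List String) :=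
  (daten.foldl (fun report_dict l =>
      let wort := pvKey l
      let report_dict :=
        if !report_dict.contains wort then report_dict.insert wort [] else report_dict
      -- report_dict[wort].append(l)
      report_dict.modify wort [] (fun v => v ++ [l]))
    (PySem.Dict.empty : PySem.Dict String (List String))).items

-- ===== PORT B =====
def report_vorbereitung_alt (daten : List String) : List (String × List String) :=
  let schluessel := daten.map pvKey
  (PySem.List.dedup schluessel).map
    (fun k => (k, (daten.zip schluessel).filterMap
      (fun p => if p.2 == k then some p.1 else none)))

-- ===== PRECONDITION & SPEC =====
def Spec_report_vorbereitung (daten : List String) (out : List (String × List String)) : Prop := out = report_vorbereitung_alt daten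
instance (daten : List String) (out : List (String × List String)) : Decidable (Spec_report_vorbereitung daten out) := by unfold Spec_report_vorbereitung; infer_instance

-- ===== CLAIM (what is proved, stated in full; the proofs are below) =====
def Claim_equal_report_vorbereitung : Prop := ∀ (daten : List String), Dom_report_vorbereitung daten → Spec_report_vorbereitung daten (report_vorbereitung daten)

-- ===== LEMMAS AND PROOFS =====

-- A's 'if missing: insert []; then append' is one Dict.modify step
theorem pv_step_eq (d : PySem.Dict String (List String)) (l : String) :
    (if !d.contains (pvKey l) then d.insert (pvKey l) [] else d).modify (pvKey l) []
        (fun v => v ++ [l])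
      = d.modify (pvKey l) [] (fun v => v ++ [l]) := by
  by_cases h : d.contains (pvKey l)
  · simp [h]
  · simp only [Bool.not_eq_true] at h
    simp only [h, Bool.not_false, if_pos, PySem.Dict.modify,
      PySem.Dict.getD_insert_self, PySem.Dict.insert_insert_self]
    rw [PySem.Dict.getD_of_not_contains _ _ h]

-- A's loop is the pairwise modify-append loop over (key, line) pairs
theorem pv_foldA_eq (daten : List String) :
    (daten.foldl (fun report_dict l =>
        let wort := pvKey l
        let report_dict :=
          if !report_dict.contains wort then report_dict.insert wort [] else report_dict
        report_dict.modify wort [] (fun v => v ++ [l]))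
      (PySem.Dict.empty : PySem.Dict String (List String)))
    = (daten.map (fun l => (pvKey l, l))).foldl
        (fun d p => d.modify p.1 [] (fun v => v ++ [p.2])) PySem.Dict.empty := by
  rw [List.foldl_map]
  exact PySem.List.foldl_congr_mem daten _ _ _ (fun d l _ => pv_step_eq d l)

theorem pv_group_eq (daten : List String) (c : String) :
    ((daten.map (fun l => (pvKey l, l))).filter (fun p => p.1 == c)).map (fun p => p.2)
      = (daten.zip (daten.map pvKey)).filterMap
          (fun p => if p.2 == c then some p.1 else none) := by
  induction daten with
  | nil => rfl
  | cons x xs ih =>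
      by_cases h : pvKey x = c <;> simp [h, ih]

theorem report_vorbereitung_eq (daten : List String) :
    report_vorbereitung daten = report_vorbereitung_alt daten := by
  unfold report_vorbereitung report_vorbereitung_alt
  rw [pv_foldA_eq]
  have hkeys : ((daten.map (fun l => (pvKey l, l))).foldl
      (fun d p => d.modify p.1 [] (fun v => v ++ [p.2]))
      (PySem.Dict.empty : PySem.Dict String (List String))).keys
      = PySem.List.dedup (daten.map pvKey) := by
    rw [PySem.Dict.keys_foldl_modify_key (daten.map (fun l => (pvKey l, l)))
      (fun p => p.1) [] (fun _ p v => v ++ [p.2])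
      (PySem.Dict.empty : PySem.Dict String (List String))]
    simp [PySem.Dict.keys_empty, PySem.Set.update_nil_left, List.map_map,
      PySem.List.dedup_eq_ofList]
    rfl
  have hnodup : ((daten.map (fun l => (pvKey l, l))).foldl
      (fun d p => d.modify p.1 [] (fun v => v ++ [p.2]))
      (PySem.Dict.empty : PySem.Dict String (List String))).keys.Nodup := by
    rw [hkeys]; exact PySem.List.nodup_dedup _
  rw [PySem.Dict.items_eq_map_keys _ hnodup [], hkeys]
  refine List.map_congr_left (fun k _ => ?_)
  rw [PySem.Dict.getD_foldl_modify_append, PySem.Dict.getD_empty, List.nil_append,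
    pv_group_eq]

-- ===== VERDICT (by name: the statement is the Claim_ definition above) =====
theorem report_vorbereitung_spec : Claim_equal_report_vorbereitung := by
  intro daten _
  exact report_vorbereitung_eq daten
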